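-- pv_equiv track=rewrite | github.com/kevinkjt2000/advent-of-code | 2019/day4.py | only_double_is_present
-- ===== SOURCE A (Python) =====
-- def only_double_is_present(string):
--     for i in range(len(string) - 1):
--         if string[i] == string[i+1]:
--             right = True
--             if i < len(string) - 2:
--                 right = string[i] != string[i+2]
--             left = True
--             if 0 < i:
--                 left = string[i-1] != string[i]
--             if left and right:
--                 return True
--     return False
-- ===== SOURCE B (Python) =====
-- def only_double_is_present(string):
--     i, n = 0, len(string)
--     while i < n:
--         j = i + 1
--         while j < n and string[j] == string[i]:
--             j += 1
--         if j - i == 2: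
--             return True
--         i = j
--     return False
-- ===== Notes on version B (the rewrite author's own statement) =====
-- stated objective: alternative
-- what changed: B scans the string as maximal runs of equal characters with a two-pointer loop and asks whether some run has length exactly 2, instead of A's per-index neighbour checks against positions i-1, i+1 and i+2.
import Mathlib
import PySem

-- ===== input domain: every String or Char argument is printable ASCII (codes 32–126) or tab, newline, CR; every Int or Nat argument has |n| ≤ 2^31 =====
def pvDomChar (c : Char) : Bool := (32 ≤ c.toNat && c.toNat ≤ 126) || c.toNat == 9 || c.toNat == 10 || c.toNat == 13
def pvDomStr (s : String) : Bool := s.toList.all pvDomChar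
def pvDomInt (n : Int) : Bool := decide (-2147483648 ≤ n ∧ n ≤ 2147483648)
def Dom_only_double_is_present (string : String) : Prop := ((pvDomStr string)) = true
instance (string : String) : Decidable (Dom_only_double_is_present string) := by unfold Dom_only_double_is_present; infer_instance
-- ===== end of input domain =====

-- B replaces A's per-index neighbour checks (i-1, i+1, i+2) by a scan over maximal runs
-- of equal adjacent characters, returning whether some run has length exactly 2.

-- ===== PORT A =====
-- Every index A reads is in range (0 ≤ i ≤ len-2; i+1, i+2 and i-1 are only read under the
-- guards A itself has), so `getD _ ' '` is exact for Python's s[.] here; the early `return True`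
-- of the pure any-loop is ported as `||` accumulation.
def only_double_is_present (string : String) : Bool :=
  let cs := string.toList
  let n := cs.length
  (List.range (n - 1)).foldl (fun acc i =>
    acc ||
      ((cs.getD i ' ' == cs.getD (i + 1) ' ') &&
        ((if i < n - 2 then !(cs.getD i ' ' == cs.getD (i + 2) ' ') else true) &&
          (if 0 < i then !(cs.getD (i - 1) ' ' == cs.getD i ' ') else true)))) false

-- ===== PORT B =====
-- Source B's outer while consumes one maximal run per iteration; the inner while
-- (j advancing while string[j] == string[i]) is the takeWhile/dropWhile split.
def only_double_is_present_altGo : List Char → Bool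
  | [] => false
  | c :: rest =>
    let run := rest.takeWhile (fun x => x == c)
    if run.length + 1 == 2 then true
    else only_double_is_present_altGo (rest.dropWhile (fun x => x == c))
termination_by l => l.length
decreasing_by
  have h := List.length_dropWhile_le (fun x => x == c) rest
  simp only [List.length_cons]
  omega

def only_double_is_present_alt (string : String) : Bool :=
  only_double_is_present_altGo string.toList

-- ===== PRECONDITION & SPEC =====
def Spec_only_double_is_present (string : String) (out : Bool) : Prop := out = only_double_is_present_alt string
instance (string : String) (out : Bool) : Decidable (Spec_only_double_is_present string out) := by unfold Spec_only_double_is_present; infer_instance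

-- ===== CLAIM (what is proved, stated in full; the proofs are below) =====
def Claim_equal_only_double_is_present : Prop := ∀ (string : String), Dom_only_double_is_present string → Spec_only_double_is_present string (only_double_is_present string)

-- ===== LEMMAS AND PROOFS =====

-- A's per-index condition, generalised by the character preceding the list (for index shifting).
def pGen (prev : Option Char) (l : List Char) (i : Nat) : Bool :=
  (l.getD i ' ' == l.getD (i + 1) ' ') &&
    ((if i + 2 < l.length then !(l.getD i ' ' == l.getD (i + 2) ' ') else true) &&
      (if i = 0 then (match prev with | some q => !(q == l.getD 0 ' ') | none => true)
       else !(l.getD (i - 1) ' ' == l.getD i ' ')))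

-- Structural left-to-right scan equivalent to "any index satisfies pGen".
def scanP (prev : Option Char) : List Char → Bool
  | x :: y :: t =>
      ((x == y) &&
        ((match t with | z :: _ => !(x == z) | [] => true) &&
          (match prev with | some q => !(q == x) | none => true)))
      || scanP (some x) (y :: t)
  | _ => false

theorem foldl_or_any (p : Nat → Bool) (l : List Nat) (a : Bool) :
    l.foldl (fun acc i => acc || p i) a = (a || l.any p) := by
  induction l generalizing a with
  | nil => simp
  | cons x t ih =>
      rw [List.foldl_cons, ih, List.any_cons]
      cases a <;> cases p x <;> simp

theorem pGen_shift (prev : Option Char) (x : Char) (l : List Char) (i : Nat) :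
    pGen prev (x :: l) (i + 1) = pGen (some x) l i := by
  have hb : (i + 1 + 2 < (x :: l).length) ↔ (i + 2 < l.length) := by
    simp [List.length_cons]; omega
  cases i with
  | zero =>
      simp only [pGen, List.getD_cons_succ, List.getD_cons_zero, hb]
      simp
  | succ j =>
      have h1 : j + 1 + 1 - 1 = j + 1 := rfl
      have h2 : j + 1 - 1 = j := rfl
      simp only [pGen, List.getD_cons_succ, hb, h1, h2]
      simp

theorem any_range_scanP (l : List Char) (prev : Option Char) :
    (List.range (l.length - 1)).any (pGen prev l) = scanP prev l := by
  induction l generalizing prev with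
  | nil => simp [scanP]
  | cons x l ih =>
      cases l with
      | nil => simp [scanP]
      | cons y t =>
          rw [show (x :: y :: t).length - 1 = t.length + 1 from by simp,
              List.range_succ_eq_map, List.any_cons, List.any_map]
          have hsh : (pGen prev (x :: y :: t) ∘ Nat.succ) = pGen (some x) (y :: t) := by
            funext i
            exact pGen_shift prev x (y :: t) i
          rw [hsh]
          have hrest := ih (prev := some x)
          rw [List.length_cons, Nat.add_sub_cancel] at hrest
          rw [hrest]
          cases prev <;> cases t <;> simp [pGen, scanP]

-- prev never matters past index 0; if the head differs from prev's char, prev doesn't matter at all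
theorem beq_symm_false {c y : Char} (h : (y == c) = false) : (c == y) = false := by
  refine beq_eq_false_iff_ne.mpr ?_
  intro e
  exact (beq_eq_false_iff_ne.mp h) e.symm

theorem scanP_prev_irrel (c y : Char) (t : List Char) (h : (y == c) = false) :
    scanP (some c) (y :: t) = scanP none (y :: t) := by
  cases t with
  | nil => rfl
  | cons z t' => simp [scanP, beq_symm_false h]

theorem scanP_skip (c : Char) (t : List Char) :
    scanP (some c) (c :: t) = scanP (some c) t := by
  cases t with
  | nil => rfl
  | cons y t' => simp [scanP]

theorem scanP_dropWhile (c : Char) (u : List Char) :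
    scanP (some c) u = scanP none (u.dropWhile (fun x => x == c)) := by
  induction u with
  | nil => rfl
  | cons z t ih =>
      by_cases hz : (z == c) = true
      · have hzc : z = c := beq_iff_eq.mp hz
        subst hzc
        rw [scanP_skip, ih]
        simp
      · have hz' : (z == c) = false := Bool.eq_false_iff.mpr hz
        rw [List.dropWhile_cons]
        simp only [hz']
        exact scanP_prev_irrel c z t hz'

theorem scanP_true_double (c : Char) (rest2 : List Char)
    (h : rest2.takeWhile (fun x => x == c) = []) :
    scanP none (c :: c :: rest2) = true := by
  cases rest2 with
  | nil => simp [scanP]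
  | cons z t =>
      have hz : (z == c) = false := by
        cases hzc : (z == c) with
        | false => rfl
        | true => rw [List.takeWhile_cons] at h; simp [hzc] at h
      simp [scanP, beq_symm_false hz]

theorem scanP_step (c : Char) (rest : List Char)
    (h : (rest.takeWhile (fun x => x == c)).length ≠ 1) :
    scanP none (c :: rest) = scanP none (rest.dropWhile (fun x => x == c)) := by
  cases rest with
  | nil => rfl
  | cons y t =>
      by_cases hy : (y == c) = true
      · have hyc : y = c := beq_iff_eq.mp hy
        subst hyc
        have htw : (t.takeWhile (fun x => x == y)) ≠ [] := by
          intro he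
          apply h
          rw [List.takeWhile_cons]
          simp [he]
        cases ht : t with
        | nil => rw [ht] at htw; simp at htw
        | cons z t2 =>
            subst ht
            have hz : (z == y) = true := by
              cases hzc : (z == y) with
              | true => rfl
              | false =>
                  exfalso; apply htw
                  rw [List.takeWhile_cons, hzc]
                  simp
            have hyz : (y == z) = true := beq_iff_eq.mpr (beq_iff_eq.mp hz).symm
            have h1 : scanP none (y :: y :: z :: t2) = scanP (some y) (y :: z :: t2) := by
              simp [scanP, hyz]
            rw [h1, scanP_dropWhile]
      · have hy' : (y == c) = false := Bool.eq_false_iff.mpr hy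
        have h1 : scanP none (c :: y :: t) = scanP (some c) (y :: t) := by
          have hcy : (c == y) = false := beq_symm_false hy'
          cases t with
          | nil => simp [scanP, hcy]
          | cons z t' => simp [scanP, hcy]
        rw [h1, scanP_prev_irrel c y t hy']
        rw [List.dropWhile_cons, hy']
        simp

theorem scanP_eq_altGo_bounded : ∀ (n : Nat) (l : List Char), l.length ≤ n →
    scanP none l = only_double_is_present_altGo l := by
  intro n
  induction n with
  | zero =>
      intro l hl
      have : l = [] := List.eq_nil_of_length_eq_zero (Nat.le_zero.mp hl)
      subst this
      rw [only_double_is_present_altGo]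
      simp [scanP]
  | succ n ih =>
      intro l hl
      cases l with
      | nil =>
          rw [only_double_is_present_altGo]
          simp [scanP]
      | cons c rest =>
          simp only [only_double_is_present_altGo]
          by_cases h2 : (((rest.takeWhile (fun x => x == c)).length + 1 == 2) = true)
          · rw [if_pos h2]
            have hrun : (rest.takeWhile (fun x => x == c)).length = 1 := by
              have h3 : (rest.takeWhile (fun x => x == c)).length + 1 = 2 := by
                simpa using h2
              omega
            cases hr : rest with
            | nil => rw [hr] at hrun; simp at hrun
            | cons y t =>
                subst hr
                have hy : (y == c) = true := by
                  cases hyc : (y == c) with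
                  | true => rfl
                  | false => rw [List.takeWhile_cons, hyc] at hrun; simp at hrun
                have hyc : y = c := beq_iff_eq.mp hy
                subst hyc
                have htw : t.takeWhile (fun x => x == y) = [] := by
                  rw [List.takeWhile_cons] at hrun
                  simp only [hy, if_true, List.length_cons] at hrun
                  exact List.eq_nil_of_length_eq_zero (by omega)
                exact scanP_true_double y t htw
          · rw [if_neg h2]
            have hne : (rest.takeWhile (fun x => x == c)).length ≠ 1 := by
              intro he
              exact h2 (by simp [he])
            rw [scanP_step c rest hne]
            apply ih
            have hd := List.length_dropWhile_le (fun x => x == c) rest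
            simp only [List.length_cons] at hl
            omega

theorem scanP_eq_altGo (l : List Char) :
    scanP none l = only_double_is_present_altGo l :=
  scanP_eq_altGo_bounded l.length l (Nat.le_refl _)

theorem pGen_none_eq_portA (cs : List Char) (i : Nat) :
    ((cs.getD i ' ' == cs.getD (i + 1) ' ') &&
      ((if i < cs.length - 2 then !(cs.getD i ' ' == cs.getD (i + 2) ' ') else true) &&
        (if 0 < i then !(cs.getD (i - 1) ' ' == cs.getD i ' ') else true)))
    = pGen none cs i := by
  unfold pGen
  have hb : (i < cs.length - 2) = (i + 2 < cs.length) := by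
    simp only [eq_iff_iff]
    omega
  simp only [hb]
  congr 1
  congr 1
  by_cases h0 : i = 0
  · subst h0; simp
  · have : 0 < i := Nat.pos_of_ne_zero h0
    simp [this, h0]

-- ===== VERDICT (by name: the statement is the Claim_ definition above) =====
theorem only_double_is_present_spec : Claim_equal_only_double_is_present := by
  intro s _
  unfold Spec_only_double_is_present only_double_is_present only_double_is_present_alt
  simp only []
  rw [foldl_or_any, Bool.false_or]
  have h1 : (List.range (s.toList.length - 1)).any
      (fun i => ((s.toList.getD i ' ' == s.toList.getD (i + 1) ' ') &&
        ((if i < s.toList.length - 2 then !(s.toList.getD i ' ' == s.toList.getD (i + 2) ' ') else true) &&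
          (if 0 < i then !(s.toList.getD (i - 1) ' ' == s.toList.getD i ' ') else true))))
      = (List.range (s.toList.length - 1)).any (pGen none s.toList) := by
    apply congrArg
    funext i
    exact pGen_none_eq_portA s.toList i
  rw [h1, any_range_scanP, scanP_eq_altGo]
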